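-- pv_equiv track=rewrite | github.com/Ohjiwoo-lab/Baekjoon_study | 프로그래머스/lv1/92334. 신고 결과 받기/신고 결과 받기.py | solution
-- ===== SOURCE A (Python) =====
-- def solution(id_list, report, k):
--     answer = []
--
--     user_dict,count_dict={},{}
--     for id in id_list:
--         user_dict[id]=[]
--         count_dict[id]=0
--
--     report = set(report)
--     for i in report:
--         a,b = i.split()
--         user_dict[b].append(a)
--
--     for _, name in user_dict.items():
--         if len(name)<k:
--             continue
--         for n in name:
--             count_dict[n]+=1
--
--     answer = list(count_dict.values())
--
--     return answer
-- ===== SOURCE B (Python) =====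
-- def solution(id_list, report, k):
--     # count-then-mark: count distinct reports per reported user, build a banned
--     # set, then one flat pass adds mail to each reporter of a banned user.
--     ids = list(dict.fromkeys(id_list))  # one dict entry per id, first-occurrence order
--     reports = [r.split() for r in set(report)]
--     cnt = {i: 0 for i in ids}
--     for a, b in reports:
--         cnt[b] += 1
--     banned = {b for b in ids if cnt[b] >= k}
--     mail = {i: 0 for i in ids}
--     for a, b in reports:
--         if b in banned:
--             mail[a] += 1
--     return [mail[i] for i in ids]
-- ===== Notes on version B (the rewrite author's own statement) =====
-- stated objective: simpler
-- what changed: Replaces A's per-reported-user reporter lists and nested count loop by two flat passes over the deduped reports: a count dict plus a banned set built first, then one pass adding mail to the reporter of each report whose target is banned.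
-- outside the precondition, e.g. on solution(['a'], ['x a'], 5): A returns [0], B returns [0]
import Mathlib
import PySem

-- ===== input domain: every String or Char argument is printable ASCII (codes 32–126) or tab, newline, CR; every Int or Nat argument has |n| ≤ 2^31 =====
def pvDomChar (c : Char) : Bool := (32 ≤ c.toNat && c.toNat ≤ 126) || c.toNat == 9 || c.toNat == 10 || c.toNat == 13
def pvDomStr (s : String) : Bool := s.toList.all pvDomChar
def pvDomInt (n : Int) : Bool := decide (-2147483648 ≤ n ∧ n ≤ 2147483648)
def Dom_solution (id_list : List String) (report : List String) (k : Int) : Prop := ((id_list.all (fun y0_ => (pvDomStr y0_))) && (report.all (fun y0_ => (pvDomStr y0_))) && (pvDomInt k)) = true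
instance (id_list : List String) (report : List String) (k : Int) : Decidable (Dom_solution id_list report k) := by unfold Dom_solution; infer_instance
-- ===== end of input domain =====

-- B replaces A's per-reported reporter lists + nested counting loop by a count dict, a banned set
-- and two flat passes over the deduped reports (objective: simpler); return values proved equal.


-- ===== PORT A =====
-- tuple unpacking 'a, b = <2-list>' (used by both ports; dflt where Python would raise, excluded by Pre_)
def pvUnpack2 {g : Type} (l : List String) (f : String -> String -> g) (dflt : g) : g :=
  match l with
  | [a, b] => f a b
  | _ => dflt

def solution (id_list : List String) (report : List String) (k : Int) : List Int :=
  let dicts := id_list.foldl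
      (fun (p : PySem.Dict String (List String) × PySem.Dict String Int) id =>
        (p.1.insert id [], p.2.insert id 0))
      (PySem.Dict.empty, PySem.Dict.empty)
  let report' := PySem.Set.ofList report
  let user_dict := report'.foldl
      (fun d i => pvUnpack2 (PySem.Str.split₀ i)
        (fun a b => d.modify b [] (fun l => l ++ [a]))  -- user_dict[b].append(a); Pre_ rules out ValueError/KeyError
        d)
      dicts.1
  let count_dict := user_dict.items.foldl
      (fun cd p =>
        if (p.2.length : Int) < k then cd
        else p.2.foldl (fun cd n => cd.modify n 0 (fun c => c + 1)) cd)  -- count_dict[n] += 1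
      dicts.2
  count_dict.values

-- ===== PORT B =====
def solution_alt (id_list : List String) (report : List String) (k : Int) : List Int :=
  let ids := PySem.List.dedup id_list  -- ids = list(dict.fromkeys(id_list))
  let reports := (PySem.Set.ofList report).map PySem.Str.split₀
  let cnt := reports.foldl
      (fun d p => pvUnpack2 p
        (fun _ b => d.modify b 0 (fun c => c + 1))  -- cnt[b] += 1; Pre_ rules out ValueError/KeyError
        d)
      (ids.foldl (fun d i => d.insert i 0) PySem.Dict.empty)
  let banned : PySem.Set String :=
    ids.foldl (fun s b => if k ≤ cnt.getD b 0 then PySem.Set.add s b else s) PySem.Set.empty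
  let mail := reports.foldl
      (fun d p => pvUnpack2 p
        (fun a b => if PySem.Set.contains banned b then d.modify a 0 (fun c => c + 1) else d)
        d)
      (ids.foldl (fun d i => d.insert i 0) PySem.Dict.empty)
  ids.map (fun i => mail.getD i 0)

-- ===== PRECONDITION & SPEC =====
-- Pre_ excludes inputs where a report does not split into exactly two tokens, or names an id
-- outside id_list: there A raises (ValueError/KeyError), except when the foreign id is only an
-- unpunished reporter, where both programs return the same value anyway.
def Pre_solution (id_list : List String) (report : List String) (k : Int) : Prop :=
  ∀ r ∈ report, (PySem.Str.split₀ r).length = 2 ∧ ∀ t ∈ PySem.Str.split₀ r, t ∈ id_list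
instance (id_list : List String) (report : List String) (k : Int) : Decidable (Pre_solution id_list report k) := by unfold Pre_solution; infer_instance

def pvWitness_solution : List String × List String × Int :=
  (["alice", "bob", "carol"], ["alice bob", "bob alice", "alice bob", "carol bob"], 2)

def Spec_solution (id_list : List String) (report : List String) (k : Int) (out : List Int) : Prop := out = solution_alt id_list report k
instance (id_list : List String) (report : List String) (k : Int) (out : List Int) : Decidable (Spec_solution id_list report k out) := by unfold Spec_solution; infer_instance

-- ===== CLAIM (what is proved, stated in full; the proofs are below) =====
def Claim_equal_solution : Prop := ∀ (id_list : List String) (report : List String) (k : Int), Dom_solution id_list report k → Pre_solution id_list report k → Spec_solution id_list report k (solution id_list report k)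

-- ===== LEMMAS AND PROOFS =====

def pvFa (r : String) : String := (PySem.Str.split₀ r).getD 0 ""
def pvFb (r : String) : String := (PySem.Str.split₀ r).getD 1 ""

lemma pv_split_eq (r : String) (h2 : (PySem.Str.split₀ r).length = 2) :
    PySem.Str.split₀ r = [pvFa r, pvFb r] := by
  unfold pvFa pvFb
  rcases hl : PySem.Str.split₀ r with _ | ⟨a, _ | ⟨b, _ | _⟩⟩ <;> simp_all

lemma pv_update_noop {α : Type} [BEq α] [LawfulBEq α] (s : PySem.Set α) (xs : List α)
    (h : ∀ x ∈ xs, x ∈ s) : PySem.Set.update s xs = s := by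
  rw [PySem.Set.update_eq_append_filter]
  have hnil : (PySem.Set.ofList xs).filter (fun y => !PySem.Set.contains s y) = [] := by
    rw [List.filter_eq_nil_iff]
    intro a ha
    have : a ∈ s := h a ((PySem.Set.mem_ofList xs a).mp ha)
    simpa using this
  rw [hnil, List.append_nil]

lemma pv_init_items {ν : Type} (ids : List String) (v : ν) :
    (ids.foldl (fun d i => d.insert i v) (PySem.Dict.empty : PySem.Dict String ν)).items
      = (PySem.List.dedup ids).map (fun i => (i, v)) := by
  rw [PySem.List.dedup_eq_ofList]
  induction ids using List.reverseRecOn with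
  | nil => rfl
  | append_singleton l i ih =>
    rw [List.foldl_append, List.foldl_cons, List.foldl_nil, PySem.Set.ofList_append_singleton]
    have hkeys : (l.foldl (fun d i => d.insert i v) (PySem.Dict.empty : PySem.Dict String ν)).keys
        = PySem.Set.ofList l := by
      simp only [PySem.Dict.keys, ih, List.map_map]
      exact List.map_id _
    by_cases hmem : i ∈ PySem.Set.ofList l
    · rw [PySem.Set.add_of_mem hmem]
      have hcont : (l.foldl (fun d i => d.insert i v)
          (PySem.Dict.empty : PySem.Dict String ν)).contains i = true :=
        (PySem.Dict.contains_iff_mem_keys _ _).mpr (by rw [hkeys]; exact hmem)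
      rw [PySem.Dict.items_insert_of_contains _ v hcont, ih, List.map_map]
      apply List.map_congr_left
      intro b _
      by_cases hb : b = i <;> simp [hb]
    · rw [PySem.Set.add_of_not_mem hmem]
      have hcont : (l.foldl (fun d i => d.insert i v)
          (PySem.Dict.empty : PySem.Dict String ν)).contains i = false := by
        apply Bool.eq_false_iff.mpr
        intro hc
        exact hmem (by rw [← hkeys]; exact (PySem.Dict.contains_iff_mem_keys _ _).mp hc)
      rw [PySem.Dict.items_insert_of_not_contains _ v hcont, ih, List.map_append]
      rfl

lemma pv_init_keys {ν : Type} (ids : List String) (v : ν) :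
    (ids.foldl (fun d i => d.insert i v) (PySem.Dict.empty : PySem.Dict String ν)).keys
      = PySem.List.dedup ids := by
  simp only [PySem.Dict.keys, pv_init_items ids v, List.map_map]
  exact List.map_id _

lemma pv_init_getD {ν : Type} (ids : List String) (v : ν) (x : String)
    (hx : x ∈ PySem.List.dedup ids) (d0 : ν) :
    (ids.foldl (fun d i => d.insert i v) (PySem.Dict.empty : PySem.Dict String ν)).getD x d0 = v := by
  apply PySem.Dict.getD_of_mem_items
  · rw [pv_init_items ids v]; exact List.mem_map.mpr ⟨x, hx, rfl⟩
  · rw [pv_init_keys ids v, PySem.List.dedup_eq_ofList]; exact PySem.Set.nodup_ofList ids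

lemma pv_countfold (k : Int) (Q : List (String × List String)) (cd : PySem.Dict String Int) (x : String) :
    (Q.foldl (fun cd p => if ((p.2.length : Int)) < k then cd
        else p.2.foldl (fun cd n => cd.modify n 0 (fun c => c + 1)) cd) cd).getD x 0
      = cd.getD x 0
        + (Q.map (fun p => if ((p.2.length : Int)) < k then 0 else (p.2.count x : Int))).sum := by
  induction Q generalizing cd with
  | nil => simp
  | cons q Q ih =>
    simp only [List.foldl_cons, List.map_cons, List.sum_cons]
    by_cases h : ((q.2.length : Int)) < k
    · rw [if_pos h, if_pos h, ih]; ring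
    · rw [if_neg h, if_neg h, ih, PySem.Dict.getD_foldl_modify_add_one]; ring

lemma pv_countfold_keys (k : Int) (Q : List (String × List String)) (cd : PySem.Dict String Int)
    (h : ∀ p ∈ Q, ∀ n ∈ p.2, n ∈ cd.keys) :
    (Q.foldl (fun cd p => if ((p.2.length : Int)) < k then cd
        else p.2.foldl (fun cd n => cd.modify n 0 (fun c => c + 1)) cd) cd).keys = cd.keys := by
  induction Q generalizing cd with
  | nil => simp
  | cons q Q ih =>
    simp only [List.foldl_cons]
    have hkeys : (q.2.foldl (fun cd n => cd.modify n 0 (fun c => c + 1)) cd).keys = cd.keys := by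
      rw [PySem.Dict.keys_foldl_modify q.2 0 (fun _ _ => (fun c => c + 1)) cd]
      exact pv_update_noop cd.keys q.2 (h q (by simp))
    by_cases hl : ((q.2.length : Int)) < k
    · rw [if_pos hl, ih _ (fun p hp => h p (by simp [hp]))]
    · rw [if_neg hl, ih, hkeys]
      intro p hp n hn
      rw [hkeys]
      exact h p (by simp [hp]) n hn

lemma pv_sum_single {κ : Type} (ids : List κ) (g : κ → Int) (y : κ) (hy : y ∈ ids)
    (hnd : ids.Nodup) (h0 : ∀ b ∈ ids, b ≠ y → g b = 0) : (ids.map g).sum = g y := by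
  induction ids with
  | nil => cases hy
  | cons a ids ih =>
    simp only [List.map_cons, List.sum_cons]
    rcases List.mem_cons.mp hy with rfl | hy'
    · have : ∀ b ∈ ids, g b = 0 := by
        intro b hb
        exact h0 b (by simp [hb]) (fun hby => (List.nodup_cons.mp hnd).1 (hby ▸ hb))
      rw [List.sum_eq_zero (by simpa using fun b hb => this b hb)]; ring
    · rw [ih hy' (List.nodup_cons.mp hnd).2 (fun b hb => h0 b (by simp [hb])),
        h0 a (by simp) (fun hay => (List.nodup_cons.mp hnd).1 (hay ▸ hy'))]
      ring

lemma pv_partition {α : Type} (S : List α) (ids : List String) (f : α → String) (q : α → Bool)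
    (c : String → Bool) (hnd : ids.Nodup) (hmem : ∀ r ∈ S, f r ∈ ids) :
    (ids.map (fun b => if c b then (S.countP (fun r => f r == b && q r) : Int) else 0)).sum
      = (S.countP (fun r => c (f r) && q r) : Int) := by
  induction S with
  | nil =>
    simp only [List.countP_nil, Nat.cast_zero]
    apply List.sum_eq_zero
    intro x hx
    rcases List.mem_map.mp hx with ⟨b, _, rfl⟩
    by_cases h : c b <;> simp [h]
  | cons r S ih =>
    have hmem' : ∀ x ∈ S, f x ∈ ids := fun x hx => hmem x (by simp [hx])
    simp only [List.countP_cons]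
    push_cast
    have h1 : (ids.map (fun b => if c b then ((S.countP (fun r' => f r' == b && q r') : Int)
          + (if (f r == b && q r) = true then (1:Int) else 0)) else 0)).sum
        = (ids.map (fun b => if c b then (S.countP (fun r' => f r' == b && q r') : Int) else 0)).sum
          + (ids.map (fun b => if c b then (if (f r == b && q r) = true then (1:Int) else 0) else 0)).sum := by
      rw [← PySem.List.sum_map_add_int]
      congr 1
      apply List.map_congr_left
      intro b _
      by_cases h : c b <;> simp [h]
    have h2 : (ids.map (fun b => if c b then (if (f r == b && q r) = true then (1:Int) else 0) else 0)).sum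
        = if (c (f r) && q r) = true then (1:Int) else 0 := by
      rw [pv_sum_single ids _ (f r) (hmem r (by simp)) hnd
        (by intro b hb hbne; by_cases hc : c b <;> simp [hc, beq_iff_eq, Ne.symm hbne])]
      by_cases hc : c (f r) <;> by_cases hq : q r <;> simp [hc, hq]
    calc (ids.map (fun b => if c b then ((S.countP (fun r' => f r' == b && q r') : Int)
            + (if (f r == b && q r) = true then (1:Int) else 0)) else 0)).sum
        = _ + _ := h1
      _ = (S.countP (fun r => c (f r) && q r) : Int) + (if (c (f r) && q r) = true then (1:Int) else 0) := by
          rw [ih hmem', h2]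

def pvP (report : List String) : List (String × String) :=
  (PySem.Set.ofList report).map (fun r => (pvFb r, pvFa r))

def pvG (report : List String) (b : String) : List String :=
  ((pvP report).filter (fun p => p.1 == b)).map (fun p => p.2)

lemma pv_foldl_pairs (report : List String) (d : PySem.Dict String (List String)) :
    (PySem.Set.ofList report).foldl (fun d r => d.modify (pvFb r) [] fun l => l ++ [pvFa r]) d
      = (pvP report).foldl (fun d p => d.modify p.1 [] fun l => l ++ [p.2]) d := by
  unfold pvP
  rw [List.foldl_map]

lemma pv_A_eq (ids report : List String) (k : Int)
    (hsplit : ∀ r ∈ PySem.Set.ofList report, PySem.Str.split₀ r = [pvFa r, pvFb r])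
    (hfa : ∀ r ∈ PySem.Set.ofList report, pvFa r ∈ ids)
    (hfb : ∀ r ∈ PySem.Set.ofList report, pvFb r ∈ ids) :
    solution ids report k = (PySem.List.dedup ids).map (fun x =>
      ((PySem.List.dedup ids).map (fun b => if ((pvG report b).length : Int) < k then 0
        else ((pvG report b).count x : Int))).sum) := by
  have hDnd : (PySem.List.dedup ids).Nodup := PySem.List.nodup_dedup ids
  unfold solution
  simp only []
  rw [PySem.List.foldl_prod_mk
      (f := fun (d : PySem.Dict String (List String)) (i : String) => d.insert i [])
      (g := fun (d : PySem.Dict String Int) (i : String) => d.insert i 0)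
      (l := ids) (a := PySem.Dict.empty) (b := PySem.Dict.empty)]
  rw [PySem.List.foldl_congr_mem (PySem.Set.ofList report) _
      (fun d r => d.modify (pvFb r) [] (fun l => l ++ [pvFa r])) _
      (by intro acc x hx; rw [hsplit x hx]; simp [pvUnpack2])]
  set D := PySem.List.dedup ids with hD
  set udInit := ids.foldl (fun d i => d.insert i ([] : List String)) PySem.Dict.empty with hudInit
  set cdInit := ids.foldl (fun d i => d.insert i (0 : Int)) PySem.Dict.empty with hcdInit
  set ud := (PySem.Set.ofList report).foldl
      (fun d r => d.modify (pvFb r) [] fun l => l ++ [pvFa r]) udInit with hud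
  have hud_keys : ud.keys = D := by
    rw [hud, PySem.Dict.keys_foldl_modify_key (PySem.Set.ofList report) pvFb []
        (fun _ r => fun l => l ++ [pvFa r]) udInit, hudInit, pv_init_keys ids _]
    exact pv_update_noop D _
      (by intro x hx; rcases List.mem_map.mp hx with ⟨r, hr, rfl⟩;
          exact (PySem.List.mem_dedup ids _).mpr (hfb r hr))
  have hud_getD : ∀ b ∈ D, ud.getD b [] = pvG report b := by
    intro b hb
    rw [hud, pv_foldl_pairs report udInit]
    rw [PySem.Dict.getD_foldl_modify_append (pvP report) udInit b, hudInit,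
      pv_init_getD ids _ b hb]
    rfl
  have hud_items : ud.items = D.map (fun b => (b, pvG report b)) := by
    rw [PySem.Dict.items_eq_map_keys ud (by rw [hud_keys]; exact hDnd) []]
    rw [hud_keys]
    exact List.map_congr_left (fun b hb => by rw [hud_getD b hb])
  rw [hud_items]
  have hkeysQ : ∀ p ∈ D.map (fun b => (b, pvG report b)), ∀ n ∈ p.2, n ∈ cdInit.keys := by
    intro p hp n hn
    rcases List.mem_map.mp hp with ⟨b, hb, rfl⟩
    rcases List.mem_map.mp hn with ⟨q, hq, rfl⟩
    rcases List.mem_map.mp (List.mem_of_mem_filter hq) with ⟨r, hr, rfl⟩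
    rw [hcdInit, pv_init_keys ids _]
    exact (PySem.List.mem_dedup ids _).mpr (hfa r hr)
  have hkeys : ((D.map (fun b => (b, pvG report b))).foldl
      (fun cd p => if ((p.2.length : Int)) < k then cd
        else p.2.foldl (fun cd n => cd.modify n 0 (fun c => c + 1)) cd) cdInit).keys = D := by
    rw [pv_countfold_keys k _ cdInit hkeysQ, hcdInit, pv_init_keys ids _]
  rw [PySem.Dict.values_eq_map_keys _ (by rw [hkeys]; exact hDnd) 0, hkeys]
  apply List.map_congr_left
  intro x hx
  rw [pv_countfold, hcdInit, pv_init_getD ids _ x hx, List.map_map]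
  simp only [zero_add]
  rfl

lemma pv_foldl_count (l : List String) (f : String → String) (d : PySem.Dict String Int) :
    l.foldl (fun d r => d.modify (f r) 0 fun c => c + 1) d
      = (l.map f).foldl (fun d x => d.modify x 0 fun c => c + 1) d := by
  rw [List.foldl_map]

lemma pv_B_eq (ids report : List String) (k : Int)
    (hsplit : ∀ r ∈ PySem.Set.ofList report, PySem.Str.split₀ r = [pvFa r, pvFb r])
    (hfb : ∀ r ∈ PySem.Set.ofList report, pvFb r ∈ ids) :
    solution_alt ids report k = (PySem.List.dedup ids).map (fun x =>
      ((((PySem.Set.ofList report).filter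
          (fun r => decide (k ≤ (((PySem.Set.ofList report).map pvFb).count (pvFb r) : Int)))).map
            pvFa).count x : Int)) := by
  unfold solution_alt
  simp only [List.foldl_map]
  rw [PySem.List.foldl_congr_mem (PySem.Set.ofList report)
      (fun (x : PySem.Dict String Int) (y : String) =>
        pvUnpack2 (PySem.Str.split₀ y) (fun _ b => x.modify b 0 fun c => c + 1) x)
      (fun d r => d.modify (pvFb r) 0 fun c => c + 1) _
      (by intro acc r hr; simp only [hsplit r hr]; simp [pvUnpack2])]
  rw [pv_foldl_count (PySem.Set.ofList report) pvFb]
  set D := PySem.List.dedup ids with hD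
  set S := PySem.Set.ofList report with hSdef
  set cnt := (S.map pvFb).foldl (fun d x => d.modify x 0 fun c => c + 1)
      (D.foldl (fun d i => d.insert i (0 : Int)) PySem.Dict.empty) with hcntdef
  have hcnt : ∀ b ∈ D, cnt.getD b 0 = ((S.map pvFb).count b : Int) := by
    intro b hb
    have hb' : b ∈ PySem.List.dedup D := (PySem.List.mem_dedup D b).mpr hb
    rw [hcntdef, PySem.Dict.getD_foldl_modify_add_one, pv_init_getD D _ b hb', zero_add]
  set banned := D.foldl (fun s b => if k ≤ cnt.getD b 0 then PySem.Set.add s b else s)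
      PySem.Set.empty with hbanneddef
  have hbanned : banned = PySem.Set.ofList (D.filter (fun b => decide (k ≤ cnt.getD b 0))) := by
    rw [hbanneddef, PySem.Set.ofList_eq_foldl, ← PySem.List.foldl_ite_eq_foldl_filter]
    rfl
  have hcontains : ∀ r ∈ S, PySem.Set.contains banned (pvFb r)
      = decide (k ≤ ((S.map pvFb).count (pvFb r) : Int)) := by
    intro r hr
    have hb : pvFb r ∈ D := (hD ▸ (PySem.List.mem_dedup ids _).mpr (hfb r hr))
    rw [hbanned]
    by_cases h : k ≤ ((S.map pvFb).count (pvFb r) : Int)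
    · rw [decide_eq_true h]
      apply (PySem.Set.contains_iff _ _).mpr
      rw [PySem.Set.mem_ofList]
      exact List.mem_filter.mpr ⟨hb, by rw [hcnt _ hb]; exact decide_eq_true h⟩
    · rw [decide_eq_false h]
      apply Bool.eq_false_iff.mpr
      intro hc
      have hm := (PySem.Set.contains_iff _ _).mp hc
      rw [PySem.Set.mem_ofList] at hm
      have := (List.mem_filter.mp hm).2
      rw [hcnt _ hb] at this
      exact h (of_decide_eq_true this)
  rw [PySem.List.foldl_congr_mem S _
      (fun d r => if decide (k ≤ ((S.map pvFb).count (pvFb r) : Int)) = true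
        then d.modify (pvFa r) 0 fun c => c + 1 else d) _
      (by intro acc r hr; simp only [hsplit r hr, pvUnpack2]; rw [hcontains r hr])]
  rw [PySem.List.foldl_if_eq_foldl_filter
      (p := fun r => decide (k ≤ ((S.map pvFb).count (pvFb r) : Int)))
      (f := fun (d : PySem.Dict String Int) r => d.modify (pvFa r) 0 fun c => c + 1)
      (l := S)]
  rw [pv_foldl_count _ pvFa]
  apply List.map_congr_left
  intro x hx
  have hx' : x ∈ PySem.List.dedup D := (PySem.List.mem_dedup D x).mpr hx
  rw [PySem.Dict.getD_foldl_modify_add_one, pv_init_getD D _ x hx', zero_add]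

theorem pv_equal (ids report : List String) (k : Int)
    (hrep : ∀ r ∈ report, (PySem.Str.split₀ r).length = 2 ∧
      ∀ t ∈ PySem.Str.split₀ r, t ∈ ids) :
    solution ids report k = solution_alt ids report k := by
  have hSmem : ∀ r ∈ PySem.Set.ofList report, r ∈ report :=
    fun r hr => (PySem.Set.mem_ofList report r).mp hr
  have hsplit : ∀ r ∈ PySem.Set.ofList report, PySem.Str.split₀ r = [pvFa r, pvFb r] :=
    fun r hr => pv_split_eq r (hrep r (hSmem r hr)).1
  have hfa : ∀ r ∈ PySem.Set.ofList report, pvFa r ∈ ids := by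
    intro r hr
    exact (hrep r (hSmem r hr)).2 _ (by rw [hsplit r hr]; simp)
  have hfb : ∀ r ∈ PySem.Set.ofList report, pvFb r ∈ ids := by
    intro r hr
    exact (hrep r (hSmem r hr)).2 _ (by rw [hsplit r hr]; simp)
  rw [pv_A_eq ids report k hsplit hfa hfb, pv_B_eq ids report k hsplit hfb]
  apply List.map_congr_left
  intro x hx
  set D := PySem.List.dedup ids with hD
  have hDnd : D.Nodup := PySem.List.nodup_dedup ids
  have hfbD : ∀ r ∈ PySem.Set.ofList report, pvFb r ∈ D :=
    fun r hr => (PySem.List.mem_dedup ids _).mpr (hfb r hr)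
  set S := PySem.Set.ofList report with hSdef
  have hcount : ∀ b, (S.map pvFb).count b = S.countP (fun r => pvFb r == b) := by
    intro b
    rw [List.count_eq_countP, List.countP_map]
    rfl
  have hglen : ∀ b, (pvG report b).length = S.countP (fun r => pvFb r == b) := by
    intro b
    unfold pvG pvP
    rw [List.length_map, ← List.countP_eq_length_filter, List.countP_map]
    rfl
  have hgcount : ∀ b, (pvG report b).count x
      = S.countP (fun r => pvFb r == b && (pvFa r == x)) := by
    intro b
    unfold pvG pvP
    rw [List.count_eq_countP, List.countP_map, List.countP_filter, List.countP_map]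
    apply List.countP_congr
    intro r _
    simp [Bool.and_comm]
  have hrhs : ((S.filter (fun r => decide (k ≤ ((S.map pvFb).count (pvFb r) : Int)))).map
        pvFa).count x
      = S.countP (fun r =>
          (decide (k ≤ (S.countP (fun r' => pvFb r' == pvFb r) : Int))) && (pvFa r == x)) := by
    rw [List.count_eq_countP, List.countP_map, List.countP_filter]
    apply List.countP_congr
    intro r _
    simp only [Function.comp, hcount, Bool.and_comm]
  rw [hrhs]
  have hpart := pv_partition S D pvFb (fun r => pvFa r == x)
      (fun b => decide (k ≤ (S.countP (fun r' => pvFb r' == b) : Int))) hDnd hfbD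
  rw [← hpart]
  apply congrArg List.sum
  apply List.map_congr_left
  intro b _
  rw [hglen, hgcount]
  beta_reduce
  by_cases h : k ≤ (S.countP (fun r' => pvFb r' == b) : Int)
  · rw [decide_eq_true h, if_pos rfl, if_neg (by omega)]
  · rw [decide_eq_false h, if_pos (by omega)]
    exact (if_neg (by simp)).symm

-- ===== VERDICT (by name: the statement is the Claim_ definition above) =====
theorem solution_spec : Claim_equal_solution := by
  intro ids report k _ hpre
  exact pv_equal ids report k hpre
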